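-- pv_equiv track=rewrite | github.com/ppapstructure/codetree-TILs | 240717/함수를 이용한 합과 소수 판별/use-functions-to-determine-sums-and-decimals.py | hamsu
-- ===== SOURCE A (Python) =====
-- def jak(i):
--     arr = str(i)
--     hap = 0
--     for i in arr:
--         hap += int(i)
--
--     if hap % 2 == 0:
--         return True
--
-- def hamsu(a,b):
--     hap=0
--     for i in range(a, b+1):
--         decision = True
--
--         for j in range(2,i):
--             if i % j == 0:
--                 decision = False
--
--         if decision == True and jak(i):
--             hap += 1
--
--     return hap
-- ===== SOURCE B (Python) =====
-- def hamsu(a, b):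
--     if a > b:
--         return 0
--     s = 0
--     while (s + 1) * (s + 1) <= b:
--         s += 1
--     window = [True] * (b - a + 1)
--     for p in range(2, s + 1):
--         start = max(p * p, -(-a // p) * p)
--         for m in range(start, b + 1, p):
--             window[m - a] = False
--     cnt = 0
--     for i in range(a, b + 1):
--         if sum(int(c) for c in str(i)) % 2 == 0 and window[i - a]:
--             cnt += 1
--     return cnt
-- ===== Notes on version B (the rewrite author's own statement) =====
-- stated objective: alternative
-- what changed: A tests each i in [a,b] for primality by trial division over the whole range(2,i); B strikes multiples of each factor p up to isqrt(b) out of one boolean window over [a,b] (a windowed sieve that naturally leaves 0 and 1 unstruck, matching A's empty range(2,i)) and then counts in a single pass.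
import Mathlib
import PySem

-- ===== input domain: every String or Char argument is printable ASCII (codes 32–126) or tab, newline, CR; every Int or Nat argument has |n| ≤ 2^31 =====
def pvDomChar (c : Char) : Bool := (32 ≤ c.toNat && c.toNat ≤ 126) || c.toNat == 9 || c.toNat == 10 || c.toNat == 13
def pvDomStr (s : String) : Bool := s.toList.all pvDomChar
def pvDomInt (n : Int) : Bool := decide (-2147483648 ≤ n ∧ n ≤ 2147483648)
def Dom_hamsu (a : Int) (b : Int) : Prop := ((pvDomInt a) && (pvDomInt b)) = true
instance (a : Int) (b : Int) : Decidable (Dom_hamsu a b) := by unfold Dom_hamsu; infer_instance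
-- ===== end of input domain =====

-- B replaces A's per-element trial division over range(2,i) by a windowed sieve over [a,b]:
-- multiples of each p up to isqrt(b) are struck out of one boolean array (0 and 1 are never
-- struck, exactly as A's empty range(2,i) leaves them); objective: alternative algorithm.

-- ===== PORT A =====
-- jak's digit sum: int(c) on each character of str(i); none = the ValueError from int('-') on negative i
def jakHap (i : Int) : Option Int :=
  (PySem.Int.toStr i).toList.foldl
    (fun acc c => acc.bind fun h => (PySem.Int.ofStr? c.toString).map (fun d => h + d)) (some 0)

-- jak returns True when the digit sum is even, otherwise (falls off the end) None, which Python treats as false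
def jak (i : Int) : Bool :=
  match jakHap i with
  | some h => PySem.Int.mod h 2 == 0
  | none => false  -- Python raises ValueError here; such inputs are outside Pre_hamsu

def hamsu (a : Int) (b : Int) : Int :=
  (PySem.List.pyRange a (b + 1) 1).foldl
    (fun hap i =>
      let decision := (PySem.List.pyRange 2 i 1).foldl
        (fun d j => if PySem.Int.mod i j == 0 then false else d) true
      if decision && jak i then hap + 1 else hap) 0

-- ===== PORT B =====
-- B's digit sum: sum(int(c) for c in str(i)); none = ValueError on negative i (outside Pre_hamsu)
def digitSumB (i : Int) : Option Int :=
  (PySem.Int.toStr i).toList.foldl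
    (fun acc c => acc.bind fun h => (PySem.Int.ofStr? c.toString).map (fun d => h + d)) (some 0)

-- the 'while (s+1)*(s+1) <= b: s += 1' loop of Source B
def isqrtLoop (b : Int) (s : Int) : Int :=
  if (s + 1) * (s + 1) ≤ b then isqrtLoop b (s + 1) else s
termination_by (b - s).toNat
decreasing_by
  have hx : s + 1 ≤ (s + 1) * (s + 1) := by nlinarith [sq_nonneg (s + 1), sq_nonneg s]
  omega

-- window[m - a] = False for every multiple m of p in [max(p*p, ceil(a/p)*p), b]; the indices
-- stay inside the window, so setIfInBounds coincides with Python's list assignment here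
def buildWindow (a : Int) (b : Int) : Array Bool :=
  let s := isqrtLoop b 0
  let w0 : Array Bool := Array.replicate (b - a + 1).toNat true
  (PySem.List.pyRange 2 (s + 1) 1).foldl
    (fun w p =>
      let start := max (p * p) (-(PySem.Int.floordiv (-a) p) * p)
      (PySem.List.pyRange start (b + 1) p).foldl
        (fun w m => w.setIfInBounds (m - a).toNat false) w) w0

def hamsu_alt (a : Int) (b : Int) : Int :=
  if a > b then 0
  else
    let window := buildWindow a b
    (PySem.List.pyRange a (b + 1) 1).foldl
      (fun cnt i =>
        match digitSumB i with
        | some h =>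
            if (PySem.Int.mod h 2 == 0) && window.getD (i - a).toNat false then cnt + 1 else cnt
        | none => cnt) 0

-- ===== PRECONDITION & SPEC =====
-- Pre_ excludes exactly the inputs with a < 0 and a ≤ b (a nonempty loop over some negative i),
-- on which A raises ValueError (int('-') inside jak); A returns on every other input.
def Pre_hamsu (a : Int) (b : Int) : Prop := 0 ≤ a ∨ b < a
instance (a : Int) (b : Int) : Decidable (Pre_hamsu a b) := by unfold Pre_hamsu; infer_instance
def pvWitness_hamsu : Int × Int := (2, 30)

def Spec_hamsu (a : Int) (b : Int) (out : Int) : Prop := out = hamsu_alt a b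
instance (a : Int) (b : Int) (out : Int) : Decidable (Spec_hamsu a b out) := by unfold Spec_hamsu; infer_instance

-- ===== CLAIM (what is proved, stated in full; the proofs are below) =====
def Claim_equal_hamsu : Prop := ∀ (a : Int) (b : Int), Dom_hamsu a b → Pre_hamsu a b → Spec_hamsu a b (hamsu a b)

-- ===== LEMMAS AND PROOFS =====

-- A's inner loop: start from d, set to false once any divisor is seen
theorem foldl_if_false {c : Int → Bool} (L : List Int) (d : Bool) :
    L.foldl (fun d j => if c j then false else d) d = (d && !L.any c) := by
  induction L generalizing d with
  | nil => simp
  | cons x xs ih =>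
    simp only [List.foldl_cons, List.any_cons, ih]
    by_cases h : c x <;> simp [h]

-- clearing the entries at indices f m, read back at k
theorem foldl_clear_getD (f : Int → Nat) (L : List Int) (sv : Array Bool) (k : Nat) :
    (L.foldl (fun sv m => sv.setIfInBounds (f m) false) sv).getD k false
      = (sv.getD k false && !(L.any (fun m => f m == k))) := by
  induction L generalizing sv with
  | nil => simp
  | cons x xs ih =>
    simp only [List.foldl_cons, List.any_cons, ih]
    have hstep : (sv.setIfInBounds (f x) false).getD k false
        = (sv.getD k false && !(f x == k)) := by
      rw [Array.getD_eq_getD_getElem?, Array.getD_eq_getD_getElem?, Array.getElem?_setIfInBounds]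
      by_cases h : f x = k
      · rw [if_pos h]
        have hb : (f x == k) = true := by simp [h]
        rw [hb]
        split <;> simp
      · rw [if_neg h]
        have hb : (f x == k) = false := by simp [h]
        rw [hb]
        simp
    rw [hstep, Bool.not_or]
    simp [Bool.and_assoc]

theorem foldl_clear2_getD (f : Int → Nat) (P : List Int) (M : Int → List Int) (sv : Array Bool) (k : Nat) :
    (P.foldl (fun sv p => (M p).foldl (fun sv m => sv.setIfInBounds (f m) false) sv) sv).getD k false
      = (sv.getD k false && !(P.any (fun p => (M p).any (fun m => f m == k)))) := by
  induction P generalizing sv with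
  | nil => simp
  | cons p ps ih =>
    simp only [List.foldl_cons, List.any_cons, ih, foldl_clear_getD]
    by_cases h : (M p).any (fun m => f m == k) <;> simp [h]

theorem isqrtLoop_spec (b : Int) : ∀ s : Int, 0 ≤ s →
    0 ≤ isqrtLoop b s ∧ b < (isqrtLoop b s + 1) * (isqrtLoop b s + 1) := by
  intro s
  induction s using isqrtLoop.induct b with
  | case1 s hle ih =>
    intro hs
    rw [isqrtLoop, if_pos hle]
    exact ih (by omega)
  | case2 s hle =>
    intro hs
    rw [isqrtLoop, if_neg hle]
    omega

theorem window_getD (a b i : Int) (hai : a ≤ i) (hib : i ≤ b) :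
    (buildWindow a b).getD (i - a).toNat false
      = !((PySem.List.pyRange 2 (isqrtLoop b 0 + 1) 1).any
          (fun p => (PySem.List.pyRange (max (p * p) (-(PySem.Int.floordiv (-a) p) * p)) (b + 1) p).any
            (fun m => (m - a).toNat == (i - a).toNat))) := by
  unfold buildWindow
  rw [foldl_clear2_getD]
  have hsz : (i - a).toNat < (b - a + 1).toNat := by omega
  simp [Array.getD_eq_getD_getElem?, hsz]

-- the number-theoretic heart: i ∈ [a,b] (0 ≤ a) is struck out by the windowed sieve iff it has
-- a divisor in [2, i), i.e. iff A's trial division sets decision to False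
theorem crossed_iff (a b i : Int) (h0 : 0 ≤ a) (hai : a ≤ i) (hib : i ≤ b) :
    ((PySem.List.pyRange 2 (isqrtLoop b 0 + 1) 1).any
        (fun p => (PySem.List.pyRange (max (p * p) (-(PySem.Int.floordiv (-a) p) * p)) (b + 1) p).any
          (fun m => (m - a).toNat == (i - a).toNat)))
      = ((PySem.List.pyRange 2 i 1).any (fun j => PySem.Int.mod i j == 0)) := by
  obtain ⟨hs0, hsb⟩ := isqrtLoop_spec b 0 (le_refl 0)
  set s := isqrtLoop b 0 with hs
  rw [Bool.eq_iff_iff]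
  simp only [List.any_eq_true, PySem.List.mem_pyRange_one, beq_iff_eq, PySem.Int.mod_eq_zero_iff_dvd]
  constructor
  · rintro ⟨p, ⟨hp2, hps1⟩, m, hm, hmk⟩
    have hps : (0 : Int) < p := by omega
    rw [PySem.List.mem_pyRange_iff_of_pos hps] at hm
    obtain ⟨hmlo, hmhi, hdvd⟩ := hm
    have hppm : p * p ≤ m := le_trans (le_max_left _ _) hmlo
    have hcm : -(PySem.Int.floordiv (-a) p) * p ≤ m := le_trans (le_max_right _ _) hmlo
    -- the first struck multiple is ≥ a
    have hmod0 : 0 ≤ PySem.Int.mod (-a) p := PySem.Int.mod_nonneg (-a) hps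
    have heq : PySem.Int.floordiv (-a) p * p + PySem.Int.mod (-a) p = -a :=
      PySem.Int.floordiv_mul_add_mod (-a) p
    have hneg : -(PySem.Int.floordiv (-a) p) * p = -(PySem.Int.floordiv (-a) p * p) := by ring
    have ham : a ≤ m := by omega
    have hmi : m = i := by omega
    subst hmi
    -- p divides the start (a max of two multiples of p), hence divides m
    have hds : p ∣ max (p * p) (-(PySem.Int.floordiv (-a) p) * p) := by
      rcases max_cases (p * p) (-(PySem.Int.floordiv (-a) p) * p) with ⟨h, _⟩ | ⟨h, _⟩ <;>
        rw [h]
      · exact ⟨p, rfl⟩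
      · exact Dvd.intro_left _ rfl
    have hpi : p ∣ m := by
      have := dvd_add hdvd hds
      simpa using this
    exact ⟨p, ⟨hp2, by nlinarith⟩, hpi⟩
  · rintro ⟨j, ⟨hj2, hji⟩, hjd⟩
    set n := i.toNat with hn
    have hin : i = (n : Int) := by omega
    have hjn : j.toNat ∣ n := by
      have h1 : (j.toNat : Int) = j := by omega
      have h2 : (j.toNat : Int) ∣ (n : Int) := by rw [h1, ← hin]; exact hjd
      exact_mod_cast h2
    have hn3 : 3 ≤ n := by omega
    have hnp : ¬ n.Prime := fun hp => by
      rcases hp.eq_one_or_self_of_dvd j.toNat hjn with h | h <;> omega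
    have hpp : n.minFac.Prime := Nat.minFac_prime (by omega)
    have hp2 : 2 ≤ n.minFac := hpp.two_le
    have hpd : n.minFac ∣ n := Nat.minFac_dvd n
    have hpsq : n.minFac * n.minFac ≤ n := by
      have := Nat.minFac_sq_le_self (by omega : 0 < n) hnp
      nlinarith [this]
    have hp2' : (2 : Int) ≤ (n.minFac : Int) := by exact_mod_cast hp2
    have hpsq' : (n.minFac : Int) * (n.minFac : Int) ≤ i := by rw [hin]; exact_mod_cast hpsq
    have hpi : (n.minFac : Int) ∣ i := by rw [hin]; exact_mod_cast hpd
    -- minFac ≤ s because minFac² ≤ i ≤ b < (s+1)²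
    have hple : (n.minFac : Int) < s + 1 := by nlinarith
    refine ⟨(n.minFac : Int), ⟨hp2', hple⟩, i, ?_, rfl⟩
    rw [PySem.List.mem_pyRange_iff_of_pos (by omega : (0:Int) < (n.minFac : Int))]
    obtain ⟨t, ht⟩ := hpi
    have hpi' : (n.minFac : Int) ∣ i := ⟨t, ht⟩
    have hceil : -(PySem.Int.floordiv (-a) (n.minFac : Int)) * (n.minFac : Int) ≤ i := by
      have h1 : -t ≤ PySem.Int.floordiv (-a) (n.minFac : Int) :=
        (PySem.Int.le_floordiv_iff_mul_le (by omega : (0:Int) < (n.minFac : Int))).mpr (by nlinarith)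
      nlinarith
    refine ⟨max_le hpsq' hceil, by omega, ?_⟩
    have hds : (n.minFac : Int) ∣ max ((n.minFac : Int) * (n.minFac : Int))
        (-(PySem.Int.floordiv (-a) (n.minFac : Int)) * (n.minFac : Int)) := by
      rcases max_cases ((n.minFac : Int) * (n.minFac : Int))
          (-(PySem.Int.floordiv (-a) (n.minFac : Int)) * (n.minFac : Int)) with ⟨h, _⟩ | ⟨h, _⟩ <;>
        rw [h]
      · exact ⟨(n.minFac : Int), rfl⟩
      · exact Dvd.intro_left _ rfl
    exact dvd_sub hpi' hds

theorem hamsu_spec' (a b : Int) (hpre : Pre_hamsu a b) : hamsu a b = hamsu_alt a b := by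
  unfold hamsu hamsu_alt
  by_cases hab : a > b
  · rw [if_pos hab, PySem.List.pyRange_one_eq_nil (by omega)]; rfl
  · rw [if_neg hab]
    have ha : 0 ≤ a := by
      rcases hpre with h | h
      · exact h
      · omega
    apply PySem.List.foldl_congr_mem
    intro acc i hi
    rw [PySem.List.mem_pyRange_one] at hi
    have hdec : ((PySem.List.pyRange 2 i 1).foldl
        (fun d j => if PySem.Int.mod i j == 0 then false else d) true)
        = (buildWindow a b).getD (i - a).toNat false := by
      rw [foldl_if_false, window_getD a b i (by omega) (by omega),
          crossed_iff a b i ha (by omega) (by omega)]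
      simp
    simp only [hdec]
    show (if (buildWindow a b).getD (i - a).toNat false && jak i then acc + 1 else acc) = _
    unfold jak
    have hds : digitSumB i = jakHap i := rfl
    rw [hds]
    cases jakHap i with
    | none => simp
    | some h => simp [Bool.and_comm]

-- ===== VERDICT (by name: the statement is the Claim_ definition above) =====
theorem hamsu_spec : Claim_equal_hamsu := by
  intro a b _ hpre
  exact hamsu_spec' a b hpre
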